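-- pv_equiv track=rewrite | github.com/Prajjwal-Vish/snapfen-backend | generate_data.py | get_piece_at
-- ===== SOURCE A (Python) =====
-- def get_piece_at(fen_rank: str, file_index: int) -> str:
--     """Return the piece character at file_index for a single FEN rank string."""
--     current_file = 0
--     for ch in fen_rank:
--         if ch.isdigit():
--             current_file += int(ch)
--         else:
--             if current_file == file_index:
--                 return ch
--             current_file += 1
--     return '1'
-- ===== SOURCE B (Python) =====
-- def get_piece_at(fen_rank: str, file_index: int) -> str:
--     """Return the piece character at file_index for a single FEN rank string."""
--     expanded = ''.join('1' * int(ch) if ch.isdigit() else ch for ch in fen_rank)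
--     if 0 <= file_index < len(expanded):
--         return expanded[file_index]
--     return '1'
-- ===== Notes on version B (the rewrite author's own statement) =====
-- stated objective: simpler
-- what changed: B builds the fully expanded one-char-per-square rank string once (digits become runs of '1') and answers by a single guarded index lookup, instead of A's running file counter with an early-return scan.
import Mathlib
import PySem

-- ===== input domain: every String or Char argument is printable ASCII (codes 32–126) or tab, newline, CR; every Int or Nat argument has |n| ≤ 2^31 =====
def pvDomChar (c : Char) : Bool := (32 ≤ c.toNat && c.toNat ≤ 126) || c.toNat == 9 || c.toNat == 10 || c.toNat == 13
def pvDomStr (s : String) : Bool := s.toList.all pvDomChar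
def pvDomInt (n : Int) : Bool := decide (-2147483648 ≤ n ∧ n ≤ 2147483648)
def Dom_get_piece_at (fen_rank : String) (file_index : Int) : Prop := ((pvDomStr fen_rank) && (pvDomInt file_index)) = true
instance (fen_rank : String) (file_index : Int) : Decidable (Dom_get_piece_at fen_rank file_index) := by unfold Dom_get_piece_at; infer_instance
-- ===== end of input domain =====

-- B replaces A's counter-tracking early-return scan by building the expanded one-char-per-square
-- rank once and doing a single guarded index lookup (objective: simpler).

-- ===== PORT A =====
-- the for-loop of A: state = current_file; early return on a matching piece
def pvLoopA (fi : Int) : List Char → Int → String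
  | [], _ => "1"
  | ch :: t, cur =>
    if PySem.Chars.isdigit ch then
      -- int(ch) for a single digit char: exact on digits
      pvLoopA fi t (cur + ((ch.toNat : Int) - 48))
    else if cur = fi then String.ofList [ch]
    else pvLoopA fi t (cur + 1)

def get_piece_at (fen_rank : String) (file_index : Int) : String :=
  pvLoopA file_index fen_rank.toList 0

-- ===== PORT B =====
def pvExpand (l : List Char) : List Char :=
  l.flatMap (fun ch =>
    if PySem.Chars.isdigit ch then List.replicate (ch.toNat - 48) '1' else [ch])

def get_piece_at_alt (fen_rank : String) (file_index : Int) : String :=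
  let expanded := pvExpand fen_rank.toList
  if 0 ≤ file_index ∧ file_index < expanded.length then
    String.ofList [expanded.getD file_index.toNat '1']
  else "1"

-- ===== PRECONDITION & SPEC =====
def Spec_get_piece_at (fen_rank : String) (file_index : Int) (out : String) : Prop := out = get_piece_at_alt fen_rank file_index
instance (fen_rank : String) (file_index : Int) (out : String) : Decidable (Spec_get_piece_at fen_rank file_index out) := by unfold Spec_get_piece_at; infer_instance

-- ===== CLAIM (what is proved, stated in full; the proofs are below) =====
def Claim_equal_get_piece_at : Prop := ∀ (fen_rank : String) (file_index : Int), Dom_get_piece_at fen_rank file_index → Spec_get_piece_at fen_rank file_index (get_piece_at fen_rank file_index)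

-- ===== LEMMAS AND PROOFS =====

/-- guarded lookup with default '1', as B performs it -/
def pvGetDef (xs : List Char) (i : Int) : Char :=
  if 0 ≤ i ∧ i < xs.length then xs.getD i.toNat '1' else '1'

theorem pvGetDef_nil (i : Int) : pvGetDef [] i = '1' := by
  simp [pvGetDef]

theorem pvGetDef_cons (c : Char) (ys : List Char) (i : Int) :
    pvGetDef (c :: ys) i = if i = 0 then c else pvGetDef ys (i - 1) := by
  unfold pvGetDef
  by_cases h0 : i = 0
  · subst h0; simp
  · simp only [if_neg h0]
    by_cases hp : 0 ≤ i ∧ i < (c :: ys).length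
    · have h1 : (0 : Int) < i := by omega
      rw [if_pos hp, if_pos (by simp at hp ⊢; omega)]
      have hn : i.toNat = (i - 1).toNat + 1 := by omega
      rw [hn]; simp [List.getD]
    · rw [if_neg hp, if_neg (by simp at hp ⊢; omega)]

theorem pvGetDef_replicate_append (n : ℕ) (ys : List Char) (i : Int) :
    pvGetDef (List.replicate n '1' ++ ys) i = pvGetDef ys (i - n) := by
  induction n generalizing i with
  | zero => simp
  | succ m ih =>
    rw [List.replicate_succ, List.cons_append, pvGetDef_cons]
    by_cases h0 : i = 0
    · subst h0
      rw [if_pos rfl]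
      unfold pvGetDef
      rw [if_neg (by push_cast; omega)]
    · rw [if_neg h0, ih]
      congr 1; push_cast; omega

theorem pvLoopA_eq (fi : Int) (l : List Char) (cur : Int) :
    pvLoopA fi l cur = String.ofList [pvGetDef (pvExpand l) (fi - cur)] := by
  induction l generalizing cur with
  | nil =>
    rw [pvLoopA]
    have : pvExpand [] = [] := rfl
    rw [this, pvGetDef_nil]
  | cons ch t ih =>
    by_cases hd : PySem.Chars.isdigit ch = true
    · have hb : 48 ≤ ch.toNat := by
        simp [PySem.Chars.isdigit, Char.le_def, UInt32.le_iff_toNat_le] at hd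
        have h2 : ch.toNat = ch.val.toNat := rfl
        omega
      rw [pvLoopA, if_pos hd, ih]
      have he : pvExpand (ch :: t)
          = List.replicate (ch.toNat - 48) '1' ++ pvExpand t := by
        simp [pvExpand, hd]
      rw [he, pvGetDef_replicate_append]
      have harg : fi - (cur + ((ch.toNat : Int) - 48)) = fi - cur - ((ch.toNat - 48 : ℕ) : Int) := by
        omega
      rw [harg]
    · have he : pvExpand (ch :: t) = ch :: pvExpand t := by
        simp [pvExpand, hd]
      rw [pvLoopA, if_neg hd, he, pvGetDef_cons]
      by_cases hc : cur = fi
      · subst hc; simp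
      · have h0 : ¬(fi - cur = 0) := by omega
        rw [if_neg hc, if_neg h0, ih]
        have harg : fi - (cur + 1) = fi - cur - 1 := by omega
        rw [harg]

theorem alt_eq_getDef (fen_rank : String) (file_index : Int) :
    get_piece_at_alt fen_rank file_index
      = String.ofList [pvGetDef (pvExpand fen_rank.toList) file_index] := by
  unfold get_piece_at_alt pvGetDef
  by_cases h : 0 ≤ file_index ∧ file_index < (pvExpand fen_rank.toList).length
  · simp only [if_pos h]
  · simp only [if_neg h]

-- ===== VERDICT (by name: the statement is the Claim_ definition above) =====
theorem get_piece_at_spec : Claim_equal_get_piece_at := by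
  intro fen_rank file_index _
  unfold Spec_get_piece_at
  rw [alt_eq_getDef, get_piece_at, pvLoopA_eq]
  norm_num
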